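-- pv_equiv track=rewrite | github.com/primeop/practice | 4_access_control/solution.py | has_permission_with_wildcard
-- ===== SOURCE A (Python) =====
-- from collections import deque
--
-- def _build_parent_map(role_hierarchy: list) -> dict:
--     """Build role -> list of direct parent roles. Example: ("support","viewer") => parent_map["support"] = ["viewer"]."""
--     parent_map = {}
--     for child, parent in role_hierarchy:
--         parent_map.setdefault(child, []).append(parent)
--     return parent_map
--
-- def _get_roles_with_inheritance(role: str, role_hierarchy: list) -> list:
--     """Return [role] + all ancestors (BFS). Example: role=admin, hierarchy above => [admin, support, viewer]. Visited set prevents infinite loop on cycles."""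
--     parent_map = _build_parent_map(role_hierarchy)
--     result = []
--     visited = set()
--     q = deque([role])
--     while q:
--         r = q.popleft()
--         if r in visited:
--             continue
--         visited.add(r)
--         result.append(r)
--         for parent in parent_map.get(r, []):
--             if parent not in visited:
--                 q.append(parent)
--     return result
--
-- def _permission_matches_wildcard(has_perm: str, needed: str) -> bool:
--     """True if has_perm grants needed. Exact match or has_perm is 'action:*' and needed starts with 'action:'."""
--     if has_perm == needed:
--         return True
--     if has_perm.endswith(":*"):
--         prefix = has_perm[:-2]  # e.g. "read" from "read:*"
--         return needed.startswith(prefix + ":")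
--     return False
--
-- def has_permission_with_wildcard(role: str, permission: str, role_permissions: dict, role_hierarchy: list) -> bool:
--     """
--     F5: Support wildcard: "read:*" grants any "read:resource". "read:charges" matches "read:*" or "read:charges".
--     Example:
--         role_permissions = {"viewer": ["read:*"]}
--         has_permission_with_wildcard("viewer", "read:charges", role_permissions, []) => True
--         has_permission_with_wildcard("viewer", "write:charges", role_permissions, []) => False
--     """
--     roles_to_check = _get_roles_with_inheritance(role, role_hierarchy)
--     for r in roles_to_check:
--         perms = role_permissions.get(r, [])
--         for p in perms:
--             if isinstance(p, str) and _permission_matches_wildcard(p, permission):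
--                 return True
--     return False
-- ===== SOURCE B (Python) =====
-- def _matches(has_perm, needed):
--     if has_perm == needed:
--         return True
--     if has_perm.endswith(":*"):
--         return needed.startswith(has_perm[:-2] + ":")
--     return False
--
-- def has_permission_with_wildcard(role, permission, role_permissions, role_hierarchy):
--     # Fixpoint saturation over the hierarchy edges (no parent map, no queue):
--     # grow the reachable-role list until a full pass over the edges adds nothing,
--     # then test the permissions of the reachable roles.
--     reach = [role]
--     changed = True
--     while changed:
--         changed = False
--         for child, parent in role_hierarchy:
--             if child in reach and parent not in reach:
--                 reach.append(parent)
--                 changed = True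
--     return any(isinstance(p, str) and _matches(p, permission)
--                for r in reach
--                for p in role_permissions.get(r, []))
-- ===== Notes on version B (the rewrite author's own statement) =====
-- stated objective: alternative
-- what changed: Replaces the parent-map + deque BFS that collects all ancestor roles and then scans their permissions with a fixpoint saturation: repeatedly sweep the raw hierarchy edge list, appending parents of already-reachable roles until a full pass adds nothing, then test the permissions of the reachable roles in one any()-expression.
import Mathlib
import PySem

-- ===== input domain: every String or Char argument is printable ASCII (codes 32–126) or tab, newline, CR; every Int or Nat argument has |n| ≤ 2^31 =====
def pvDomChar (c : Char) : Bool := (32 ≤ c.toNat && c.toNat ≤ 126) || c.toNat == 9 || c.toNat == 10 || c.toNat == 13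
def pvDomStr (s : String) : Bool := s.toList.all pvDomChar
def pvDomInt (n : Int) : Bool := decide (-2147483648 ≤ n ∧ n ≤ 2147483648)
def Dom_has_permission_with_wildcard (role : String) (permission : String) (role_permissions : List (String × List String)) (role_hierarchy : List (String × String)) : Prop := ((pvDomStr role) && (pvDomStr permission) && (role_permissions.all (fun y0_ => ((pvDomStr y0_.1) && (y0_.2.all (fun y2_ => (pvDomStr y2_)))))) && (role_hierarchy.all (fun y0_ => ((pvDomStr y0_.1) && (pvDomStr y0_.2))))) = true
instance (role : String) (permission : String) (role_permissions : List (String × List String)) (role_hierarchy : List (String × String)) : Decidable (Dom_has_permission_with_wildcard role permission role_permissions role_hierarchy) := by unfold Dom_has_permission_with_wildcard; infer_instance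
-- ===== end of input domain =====

-- B replaces A's parent-map + deque BFS (collect all ancestor roles, then scan their permissions)
-- by fixpoint saturation over the raw edge list followed by one any()-scan (objective: alternative).

-- ===== SHARED HELPERS (the wildcard matcher and the dict lookup are textually identical in A and B) =====

-- _permission_matches_wildcard (same helper in both Pythons); `has_perm[:-2] + ":"` via PySem.Chars
def pvMatchesWildcard (has_perm : String) (needed : String) : Bool :=
  if has_perm == needed then true
  else if PySem.Chars.endswith has_perm.toList [':', '*'] then
    PySem.Chars.startswith needed.toList (PySem.List.slice has_perm.toList none (some (-2)) ++ [':'])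
  else false

-- role_permissions.get(r, []) — dict lookup with default (first match in the association list)
def pvLookupPerms (role_permissions : List (String × List String)) (r : String) : List String :=
  (PySem.Dict.mk role_permissions).getD r []

-- ===== PORT A =====

-- _build_parent_map: parent_map.setdefault(child, []).append(parent)
def pvBuildParentMap (role_hierarchy : List (String × String)) : PySem.Dict String (List String) :=
  role_hierarchy.foldl (fun pm cp => pm.insert cp.1 (pm.getD cp.1 [] ++ [cp.2])) PySem.Dict.empty

-- the BFS while-loop of _get_roles_with_inheritance; fuel = len(role_hierarchy) + 1 provably
-- suffices (each iteration pops one element and strictly decreases queue-length + unvisited-edge count)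
def pvBfsLoop (pm : PySem.Dict String (List String)) :
    Nat → List String → PySem.Set String → List String → List String
  | 0, _, _, result => result
  | _ + 1, [], _, result => result
  | n + 1, r :: q, visited, result =>
    if PySem.Set.contains visited r then pvBfsLoop pm n q visited result
    else
      let visited' := PySem.Set.add visited r
      pvBfsLoop pm n (q ++ (pm.getD r []).filter (fun p => !PySem.Set.contains visited' p))
        visited' (result ++ [r])

-- _get_roles_with_inheritance
def pvGetRolesWithInheritance (role : String) (role_hierarchy : List (String × String)) : List String :=
  pvBfsLoop (pvBuildParentMap role_hierarchy) (role_hierarchy.length + 1) [role] PySem.Set.empty []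

-- the double for-loop with early return = any; isinstance(p, str) is always true (typed domain)
def has_permission_with_wildcard (role : String) (permission : String) (role_permissions : List (String × List String)) (role_hierarchy : List (String × String)) : Bool :=
  (pvGetRolesWithInheritance role role_hierarchy).any (fun r =>
    (pvLookupPerms role_permissions r).any (fun p => pvMatchesWildcard p permission))

-- ===== PORT B =====

-- one inner for-pass over the edge list: append parents of reachable children, track `changed`
def pvSatStep (st : List String × Bool) (cp : String × String) : List String × Bool :=
  if st.1.contains cp.1 && !st.1.contains cp.2 then (st.1 ++ [cp.2], true) else st

def pvSatPass (role_hierarchy : List (String × String)) (reach : List String) : List String × Bool :=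
  role_hierarchy.foldl pvSatStep (reach, false)

-- the while-changed loop; fuel = len(role_hierarchy) + 1 provably suffices (every productive
-- pass adds at least one new parent, and only parents of edges can ever be added)
def pvSatLoop (role_hierarchy : List (String × String)) : Nat → List String → List String
  | 0, reach => reach
  | n + 1, reach =>
    let st := pvSatPass role_hierarchy reach
    if st.2 then pvSatLoop role_hierarchy n st.1 else reach

def has_permission_with_wildcard_alt (role : String) (permission : String) (role_permissions : List (String × List String)) (role_hierarchy : List (String × String)) : Bool :=
  (pvSatLoop role_hierarchy (role_hierarchy.length + 1) [role]).any (fun r =>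
    (pvLookupPerms role_permissions r).any (fun p => pvMatchesWildcard p permission))

-- ===== PRECONDITION & SPEC =====
def Spec_has_permission_with_wildcard (role : String) (permission : String) (role_permissions : List (String × List String)) (role_hierarchy : List (String × String)) (out : Bool) : Prop := out = has_permission_with_wildcard_alt role permission role_permissions role_hierarchy
instance (role : String) (permission : String) (role_permissions : List (String × List String)) (role_hierarchy : List (String × String)) (out : Bool) : Decidable (Spec_has_permission_with_wildcard role permission role_permissions role_hierarchy out) := by unfold Spec_has_permission_with_wildcard; infer_instance

-- ===== CLAIM (what is proved, stated in full; the proofs are below) =====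
def Claim_equal_has_permission_with_wildcard : Prop := ∀ (role : String) (permission : String) (role_permissions : List (String × List String)) (role_hierarchy : List (String × String)), Dom_has_permission_with_wildcard role permission role_permissions role_hierarchy → Spec_has_permission_with_wildcard role permission role_permissions role_hierarchy (has_permission_with_wildcard role permission role_permissions role_hierarchy)

-- ===== LEMMAS AND PROOFS =====

-- the direct parents of r, read straight off the edge list
def pvPars (edges : List (String × String)) (r : String) : List String :=
  (edges.filter (fun e => e.1 == r)).map Prod.snd

-- reachability from root along hierarchy edges (child → parent)
inductive pvReach (edges : List (String × String)) (root : String) : String → Prop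
  | refl : pvReach edges root root
  | step {b c : String} : pvReach edges root b → (b, c) ∈ edges → pvReach edges root c

theorem mem_pvPars_of_edge {edges : List (String × String)} {b c : String}
    (h : (b, c) ∈ edges) : c ∈ pvPars edges b := by
  simp only [pvPars, List.mem_map, List.mem_filter]
  exact ⟨(b, c), ⟨h, by simp⟩, rfl⟩

theorem edge_of_mem_pvPars {edges : List (String × String)} {b c : String}
    (h : c ∈ pvPars edges b) : (b, c) ∈ edges := by
  simp only [pvPars, List.mem_map, List.mem_filter] at h
  obtain ⟨e, ⟨he, hb⟩, hc⟩ := h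
  have : e = (b, c) := by
    cases e; simp_all
  rwa [this] at he

-- a vis that contains root, is sound, and is closed under parents is exactly the reach set
theorem pv_closed_mem (edges : List (String × String)) (root : String) (vis : List String)
    (hvis : ∀ v ∈ vis, pvReach edges root v)
    (hclo : ∀ v ∈ vis, ∀ p ∈ pvPars edges v, p ∈ vis)
    (hroot : root ∈ vis) :
    ∀ r, r ∈ vis ↔ pvReach edges root r := by
  intro r
  constructor
  · exact hvis r
  · intro h
    induction h with
    | refl => exact hroot
    | step hb he ih => exact hclo _ ih _ (mem_pvPars_of_edge he)

-- (pvBuildParentMap edges).getD r [] is the parent list read off the edges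
theorem pvBuildParentMap_aux (edges : List (String × String)) :
    ∀ (pm : PySem.Dict String (List String)) (r : String),
    (edges.foldl (fun pm cp => pm.insert cp.1 (pm.getD cp.1 [] ++ [cp.2])) pm).getD r []
      = pm.getD r [] ++ pvPars edges r := by
  induction edges with
  | nil => intro pm r; simp [pvPars]
  | cons e t ih =>
    intro pm r
    simp only [List.foldl_cons]
    rw [ih]
    by_cases h : r = e.1
    · subst h
      rw [PySem.Dict.getD_insert_self]
      simp [pvPars]
    · rw [PySem.Dict.getD_insert_of_ne _ _ _ h]
      have : (e.1 == r) = false := by simp [Ne.symm h]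
      simp [pvPars, this]

theorem pvBuildParentMap_getD (edges : List (String × String)) (r : String) :
    (pvBuildParentMap edges).getD r [] = pvPars edges r := by
  unfold pvBuildParentMap
  rw [pvBuildParentMap_aux]
  simp

-- splitting the unvisited-edge count when x is newly visited
theorem pv_filter_split_len (edges : List (String × String)) (vis : PySem.Set String) (x : String)
    (hx : x ∉ vis) :
    (edges.filter (fun e => !PySem.Set.contains (PySem.Set.add vis x) e.1)).length
      + (edges.filter (fun e => e.1 == x)).length
      = (edges.filter (fun e => !PySem.Set.contains vis e.1)).length := by
  induction edges with
  | nil => simp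
  | cons e t ih =>
    simp only [List.filter_cons]
    by_cases h1 : e.1 = x
    · have hA : (!PySem.Set.contains (PySem.Set.add vis x) e.1) = false := by
        have : PySem.Set.contains (PySem.Set.add vis x) e.1 = true :=
          (PySem.Set.contains_iff _ _).mpr ((PySem.Set.mem_add _ _ _).mpr (Or.inr h1))
        rw [this]; rfl
      have hB : (e.1 == x) = true := by simp [h1]
      have hC : (!PySem.Set.contains vis e.1) = true := by
        have hc : PySem.Set.contains vis e.1 = false := by
          rw [Bool.eq_false_iff]
          intro hcc
          exact (h1 ▸ hx) ((PySem.Set.contains_iff _ _).mp hcc)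
        rw [hc]; rfl
      rw [hA, hB, hC, if_neg Bool.false_ne_true, if_pos rfl, if_pos rfl]
      simp only [List.length_cons]
      omega
    · have hadd : PySem.Set.contains (PySem.Set.add vis x) e.1 = PySem.Set.contains vis e.1 := by
        by_cases hm : e.1 ∈ vis
        · rw [(PySem.Set.contains_iff _ _).mpr ((PySem.Set.mem_add _ _ _).mpr (Or.inl hm)),
            (PySem.Set.contains_iff vis e.1).mpr hm]
        · have hl : PySem.Set.contains (PySem.Set.add vis x) e.1 = false := by
            rw [Bool.eq_false_iff]
            intro hc
            rcases (PySem.Set.mem_add vis x e.1).mp ((PySem.Set.contains_iff _ _).mp hc) with h | h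
            · exact hm h
            · exact h1 h
          have hr : PySem.Set.contains vis e.1 = false := by
            rw [Bool.eq_false_iff]; intro hc; exact hm ((PySem.Set.contains_iff _ _).mp hc)
          rw [hl, hr]
      have hB : (e.1 == x) = false := by simp [h1]
      rw [hadd, hB, if_neg Bool.false_ne_true]
      by_cases hc : (!PySem.Set.contains vis e.1) = true
      · rw [if_pos hc, if_pos hc]
        simp only [List.length_cons]
        omega
      · rw [if_neg hc, if_neg hc]
        omega

-- BFS loop invariant: given enough fuel, the produced list is exactly the reach set
theorem pvBfsLoop_mem (edges : List (String × String)) (root : String) :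
    ∀ (fuel : Nat) (q : List String) (vis : PySem.Set String) (res : List String),
      q.length + (edges.filter (fun e => !PySem.Set.contains vis e.1)).length ≤ fuel →
      (∀ v ∈ vis, pvReach edges root v) →
      (∀ s ∈ q, pvReach edges root s) →
      (∀ v ∈ vis, ∀ p ∈ pvPars edges v, p ∈ vis ∨ p ∈ q) →
      (root ∈ vis ∨ root ∈ q) →
      res = vis →
      ∀ r, r ∈ pvBfsLoop (pvBuildParentMap edges) fuel q vis res ↔ pvReach edges root r := by
  intro fuel
  induction fuel with
  | zero =>
    intro q vis res hfuel hvis hq hclo hroot hres r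
    have hqnil : q = [] := by
      cases q with
      | nil => rfl
      | cons a t => simp at hfuel
    subst hqnil; subst hres
    simp only [pvBfsLoop]
    exact pv_closed_mem edges root res hvis
      (fun v hv p hp => (hclo v hv p hp).resolve_right (by simp))
      (hroot.resolve_right (by simp)) r
  | succ n ih =>
    intro q vis res hfuel hvis hq hclo hroot hres r
    cases q with
    | nil =>
      subst hres
      simp only [pvBfsLoop]
      exact pv_closed_mem edges root res hvis
        (fun v hv p hp => (hclo v hv p hp).resolve_right (by simp))
        (hroot.resolve_right (by simp)) r
    | cons x t =>
      by_cases hx : PySem.Set.contains vis x = true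
      · have hxm : x ∈ vis := (PySem.Set.contains_iff vis x).mp hx
        simp only [pvBfsLoop, hx, if_pos]
        refine ih t vis res ?_ hvis (fun s hs => hq s (List.mem_cons_of_mem _ hs)) ?_ ?_ hres r
        · simp only [List.length_cons] at hfuel; omega
        · intro v hv p hp
          rcases hclo v hv p hp with h | h
          · exact Or.inl h
          · rcases List.mem_cons.mp h with h' | h'
            · exact Or.inl (h' ▸ hxm)
            · exact Or.inr h'
        · rcases hroot with h | h
          · exact Or.inl h
          · rcases List.mem_cons.mp h with h' | h'
            · exact Or.inl (h' ▸ hxm)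
            · exact Or.inr h'
      · have hxnm : x ∉ vis := fun hm => hx ((PySem.Set.contains_iff vis x).mpr hm)
        simp only [pvBfsLoop, hx, Bool.false_eq_true, if_false]
        have hreachx : pvReach edges root x := hq x List.mem_cons_self
        have hvadd : ∀ y, y ∈ PySem.Set.add vis x ↔ y ∈ vis ∨ y = x := fun y => PySem.Set.mem_add vis x y
        have hsplit := pv_filter_split_len edges vis x hxnm
        have hklen : (((pvBuildParentMap edges).getD x []).filter
            (fun p => !PySem.Set.contains (PySem.Set.add vis x) p)).length
            ≤ (edges.filter (fun e => e.1 == x)).length := by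
          calc _ ≤ ((pvBuildParentMap edges).getD x []).length := List.length_filter_le _ _
            _ = (edges.filter (fun e => e.1 == x)).length := by
                rw [pvBuildParentMap_getD]; simp [pvPars]
        refine ih _ (PySem.Set.add vis x) (res ++ [x]) ?_ ?_ ?_ ?_ ?_ ?_ r
        · simp only [List.length_append, List.length_cons] at hfuel ⊢
          omega
        · intro v hv
          rcases (hvadd v).mp hv with h | h
          · exact hvis v h
          · exact h ▸ hreachx
        · intro s hs
          rcases List.mem_append.mp hs with h | h
          · exact hq s (List.mem_cons_of_mem _ h)
          · have : s ∈ (pvBuildParentMap edges).getD x [] := List.mem_of_mem_filter h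
            rw [pvBuildParentMap_getD] at this
            exact pvReach.step hreachx (edge_of_mem_pvPars this)
        · intro v hv p hp
          rcases (hvadd v).mp hv with h | h
          · rcases hclo v h p hp with h' | h'
            · exact Or.inl ((hvadd p).mpr (Or.inl h'))
            · rcases List.mem_cons.mp h' with h'' | h''
              · exact Or.inl ((hvadd p).mpr (Or.inr h''))
              · exact Or.inr (List.mem_append.mpr (Or.inl h''))
          · rw [h] at hp
            by_cases hpv : PySem.Set.contains (PySem.Set.add vis x) p = true
            · exact Or.inl ((PySem.Set.contains_iff _ _).mp hpv)
            · refine Or.inr (List.mem_append.mpr (Or.inr ?_))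
              rw [List.mem_filter, pvBuildParentMap_getD]
              refine ⟨hp, ?_⟩
              rw [Bool.eq_false_iff.mpr hpv]
              rfl
        · rcases hroot with h | h
          · exact Or.inl ((hvadd root).mpr (Or.inl h))
          · rcases List.mem_cons.mp h with h' | h'
            · exact Or.inl ((hvadd root).mpr (Or.inr h'))
            · exact Or.inr (List.mem_append.mpr (Or.inl h'))
        · subst hres
          simp [PySem.Set.add]
          exact hxnm

theorem pvGetRoles_mem (role : String) (edges : List (String × String)) :
    ∀ r, r ∈ pvGetRolesWithInheritance role edges ↔ pvReach edges role r := by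
  intro r
  unfold pvGetRolesWithInheritance
  refine pvBfsLoop_mem edges role (edges.length + 1) [role] PySem.Set.empty [] ?_ ?_ ?_ ?_ ?_ rfl r
  · have : (edges.filter (fun e => !PySem.Set.contains PySem.Set.empty e.1)).length
        ≤ edges.length := List.length_filter_le _ _
    simp only [List.length_cons, List.length_nil]
    omega
  · intro v hv; exact absurd hv (by simp [PySem.Set.empty])
  · intro s hs
    rcases List.mem_cons.mp hs with h | h
    · exact h ▸ pvReach.refl
    · exact absurd h (by simp)
  · intro v hv; exact absurd hv (by simp [PySem.Set.empty])
  · exact Or.inr List.mem_cons_self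

-- ===== B-side lemmas =====

theorem pvSatStep_fst_mono : ∀ (l : List (String × String)) (st : List String × Bool),
    ∀ x ∈ st.1, x ∈ (List.foldl pvSatStep st l).1 := by
  intro l
  induction l with
  | nil => intro st x hx; simpa using hx
  | cons e t ih =>
    intro st x hx
    simp only [List.foldl_cons]
    refine ih _ x ?_
    unfold pvSatStep
    split
    · exact List.mem_append.mpr (Or.inl hx)
    · exact hx

theorem pvSatStep_flag_mono : ∀ (l : List (String × String)) (st : List String × Bool),
    st.2 = true → (List.foldl pvSatStep st l).2 = true := by
  intro l
  induction l with
  | nil => intro st h; simpa using h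
  | cons e t ih =>
    intro st h
    simp only [List.foldl_cons]
    refine ih _ ?_
    unfold pvSatStep
    split <;> simp_all

theorem pvSatStep_sound (edges : List (String × String)) (root : String) :
    ∀ (l : List (String × String)) (st : List String × Bool),
      (∀ cp ∈ l, cp ∈ edges) → (∀ x ∈ st.1, pvReach edges root x) →
      ∀ x ∈ (List.foldl pvSatStep st l).1, pvReach edges root x := by
  intro l
  induction l with
  | nil => intro st _ hst x hx; exact hst x (by simpa using hx)
  | cons e t ih =>
    intro st hsub hst x hx
    simp only [List.foldl_cons] at hx
    refine ih _ (fun cp hcp => hsub cp (List.mem_cons_of_mem _ hcp)) ?_ x hx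
    intro y hy
    unfold pvSatStep at hy
    split at hy
    · rename_i hcond
      rcases List.mem_append.mp hy with h | h
      · exact hst y h
      · have hy2 : y = e.2 := by simpa using h
        have h1 : e.1 ∈ st.1 := by
          have := (Bool.and_eq_true _ _).mp hcond |>.1
          simpa using this
        have he : (e.1, e.2) ∈ edges := hsub (e.1, e.2) (by simp)
        exact hy2 ▸ pvReach.step (hst e.1 h1) he
    · exact hst y hy

theorem pvSatStep_false : ∀ (l : List (String × String)) (st : List String × Bool),
    (List.foldl pvSatStep st l).2 = false →
    (List.foldl pvSatStep st l).1 = st.1 ∧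
      ∀ cp ∈ l, (st.1.contains cp.1 && !st.1.contains cp.2) = false := by
  intro l
  induction l with
  | nil => intro st h; exact ⟨rfl, by simp⟩
  | cons e t ih =>
    intro st h
    simp only [List.foldl_cons] at h ⊢
    by_cases hc : (st.1.contains e.1 && !st.1.contains e.2) = true
    · exfalso
      have : (List.foldl pvSatStep (pvSatStep st e) t).2 = true := by
        refine pvSatStep_flag_mono t _ ?_
        unfold pvSatStep
        rw [if_pos hc]
      rw [this] at h; exact Bool.true_eq_false.mp h
    · have hst : pvSatStep st e = st := by unfold pvSatStep; rw [if_neg hc]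
      rw [hst] at h ⊢
      obtain ⟨h1, h2⟩ := ih st h
      refine ⟨h1, ?_⟩
      intro cp hcp
      rcases List.mem_cons.mp hcp with h' | h'
      · subst h'; exact Bool.eq_false_iff.mpr hc
      · exact h2 cp h'

theorem pvSatStep_progress : ∀ (l : List (String × String)) (st : List String × Bool),
    st.2 = false → (List.foldl pvSatStep st l).2 = true →
    ∃ p, p ∈ (List.foldl pvSatStep st l).1 ∧ p ∉ st.1 ∧ p ∈ l.map Prod.snd := by
  intro l
  induction l with
  | nil => intro st h1 h2; simp only [List.foldl_nil] at h2; rw [h1] at h2; exact absurd h2 (by simp)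
  | cons e t ih =>
    intro st h1 h2
    simp only [List.foldl_cons] at h2 ⊢
    by_cases hc : (st.1.contains e.1 && !st.1.contains e.2) = true
    · refine ⟨e.2, ?_, ?_, by simp⟩
      · refine pvSatStep_fst_mono t _ e.2 ?_
        unfold pvSatStep
        rw [if_pos hc]
        simp
      · have := (Bool.and_eq_true _ _).mp hc |>.2
        simp only [Bool.not_eq_true'] at this
        intro hm
        rw [List.contains_eq_mem] at this
        simp [hm] at this
    · have hst : pvSatStep st e = st := by unfold pvSatStep; rw [if_neg hc]
      rw [hst] at h2 ⊢
      obtain ⟨p, hp1, hp2, hp3⟩ := ih st h1 h2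
      exact ⟨p, hp1, hp2, by simp; right; simpa using hp3⟩

-- strict decrease of the unreached-parent count on a productive pass
theorem pv_filter_le {α : Type} [BEq α] [LawfulBEq α]
    (S T : List α) (hST : ∀ x, x ∈ S → x ∈ T) :
    ∀ (l : List α), (l.filter (fun x => !T.contains x)).length
      ≤ (l.filter (fun x => !S.contains x)).length := by
  intro l
  induction l with
  | nil => simp
  | cons a t ih =>
    simp only [List.filter_cons]
    by_cases hT : a ∈ T
    · have h1 : (!T.contains a) = false := by simp [hT]
      rw [h1, if_neg Bool.false_ne_true]
      by_cases hS : a ∈ S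
      · have h2 : (!S.contains a) = false := by simp [hS]
        rw [h2, if_neg Bool.false_ne_true]
        exact ih
      · have h2 : (!S.contains a) = true := by simp [hS]
        rw [h2, if_pos rfl]
        simp only [List.length_cons]
        omega
    · have hS : a ∉ S := fun h => hT (hST a h)
      have h1 : (!T.contains a) = true := by simp [hT]
      have h2 : (!S.contains a) = true := by simp [hS]
      rw [h1, h2, if_pos rfl, if_pos rfl]
      simp only [List.length_cons]
      omega

theorem pv_filter_lt {α : Type} [BEq α] [LawfulBEq α]
    (S T : List α) (hST : ∀ x, x ∈ S → x ∈ T)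
    (p : α) (hpT : p ∈ T) (hpS : p ∉ S) :
    ∀ (l : List α), p ∈ l → (l.filter (fun x => !T.contains x)).length
      < (l.filter (fun x => !S.contains x)).length := by
  intro l
  induction l with
  | nil => intro h; exact absurd h (by simp)
  | cons a t ih =>
    intro hp
    simp only [List.filter_cons]
    by_cases hT : a ∈ T
    · have h1 : (!T.contains a) = false := by simp [hT]
      rw [h1, if_neg Bool.false_ne_true]
      by_cases hS : a ∈ S
      · have h2 : (!S.contains a) = false := by simp [hS]
        rw [h2, if_neg Bool.false_ne_true]
        have hap : a ≠ p := fun h => hpS (h ▸ hS)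
        have hpt : p ∈ t := by
          rcases List.mem_cons.mp hp with h | h
          · exact absurd h.symm hap
          · exact h
        exact ih hpt
      · have h2 : (!S.contains a) = true := by simp [hS]
        rw [h2, if_pos rfl]
        have := pv_filter_le S T hST t
        simp only [List.length_cons]
        omega
    · have hS : a ∉ S := fun h => hT (hST a h)
      have h1 : (!T.contains a) = true := by simp [hT]
      have h2 : (!S.contains a) = true := by simp [hS]
      rw [h1, h2, if_pos rfl, if_pos rfl]
      have hap : a ≠ p := fun h => hT (h ▸ hpT)
      have hpt : p ∈ t := by
        rcases List.mem_cons.mp hp with h | h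
        · exact absurd h.symm hap
        · exact h
      have := ih hpt
      simp only [List.length_cons]
      omega

theorem pvSatLoop_mem (edges : List (String × String)) (root : String) :
    ∀ (fuel : Nat) (reach : List String),
      ((edges.map Prod.snd).filter (fun p => !reach.contains p)).length < fuel →
      (∀ x ∈ reach, pvReach edges root x) → root ∈ reach →
      ∀ r, r ∈ pvSatLoop edges fuel reach ↔ pvReach edges root r := by
  intro fuel
  induction fuel with
  | zero => intro reach hfuel; omega
  | succ n ih =>
    intro reach hfuel hsound hroot r
    simp only [pvSatLoop]
    by_cases hc : (pvSatPass edges reach).2 = true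
    · rw [if_pos hc]
      have hmono : ∀ x ∈ reach, x ∈ (pvSatPass edges reach).1 :=
        pvSatStep_fst_mono edges (reach, false)
      obtain ⟨p, hp1, hp2, hp3⟩ := pvSatStep_progress edges (reach, false) rfl hc
      refine ih (pvSatPass edges reach).1 ?_ ?_ (hmono root hroot) r
      · have hlt := pv_filter_lt reach (pvSatPass edges reach).1 hmono p hp1 hp2
          (edges.map Prod.snd) hp3
        omega
      · exact pvSatStep_sound edges root edges (reach, false) (fun cp hcp => hcp) hsound
    · rw [if_neg hc]
      obtain ⟨_, h2⟩ := pvSatStep_false edges (reach, false) (Bool.eq_false_iff.mpr hc)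
      refine pv_closed_mem edges root reach hsound ?_ hroot r
      intro v hv p hp
      have he := edge_of_mem_pvPars hp
      have := h2 (v, p) he
      simp only [Bool.and_eq_false_iff] at this
      rcases this with h | h
      · exact absurd h (by simp [hv])
      · rw [Bool.not_eq_false', List.contains_eq_mem] at h
        simpa using h

theorem pvSatTop_mem (role : String) (edges : List (String × String)) :
    ∀ r, r ∈ pvSatLoop edges (edges.length + 1) [role] ↔ pvReach edges role r := by
  intro r
  refine pvSatLoop_mem edges role (edges.length + 1) [role] ?_ ?_ (by simp) r
  · have h1 : ((edges.map Prod.snd).filter (fun p => !([role].contains p))).length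
        ≤ (edges.map Prod.snd).length := List.length_filter_le _ _
    simp only [List.length_map] at h1
    omega
  · intro x hx
    rcases List.mem_cons.mp hx with h | h
    · exact h ▸ pvReach.refl
    · exact absurd h (by simp)

-- ===== VERDICT (by name: the statement is the Claim_ definition above) =====
theorem has_permission_with_wildcard_spec : Claim_equal_has_permission_with_wildcard := by
  intro role permission role_permissions role_hierarchy _
  unfold Spec_has_permission_with_wildcard
  unfold has_permission_with_wildcard has_permission_with_wildcard_alt
  rw [Bool.eq_iff_iff]
  simp only [List.any_eq_true]
  constructor
  · rintro ⟨x, hx, hfx⟩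
    exact ⟨x, (pvSatTop_mem role role_hierarchy x).mpr
      ((pvGetRoles_mem role role_hierarchy x).mp hx), hfx⟩
  · rintro ⟨x, hx, hfx⟩
    exact ⟨x, (pvGetRoles_mem role role_hierarchy x).mpr
      ((pvSatTop_mem role role_hierarchy x).mp hx), hfx⟩
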